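-- pv_equiv track=rewrite | github.com/kiranvenkat12/borewell-service | backend/app/services/crudAdminRegister.py | get_product_recommendations
-- ===== SOURCE A (Python) =====
-- def get_product_recommendations(analysis):
--     issues = analysis["issues"]
--
--     drinking = {"low": [], "medium": [], "high": []}
--     bathing = {"low": [], "medium": [], "high": []}
--     washing = {"low": [], "medium": [], "high": []}
--
--     # --- DRINKING ---
--     if any("TDS" in i or "nitrate" in i or "Acidic" in i for i in issues):
--         drinking["low"].append("Basic RO purifier")
--         drinking["medium"].append("RO + UV water purifier")
--         drinking["high"].append("RO + UV + Mineral booster purifier")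
--
--     if any("iron" in i for i in issues):
--         drinking["medium"].append("RO + Iron removal filter")
--         drinking["high"].append("Advanced iron removal + RO system")
--
--     # --- BATHING ---
--     if any("Hard water" in i or "chlorine" in i for i in issues):
--         bathing["low"].append("Tap shower filter")
--         bathing["medium"].append("Bathroom water softener")
--         bathing["high"].append("Whole house water softener")
--
--     # --- WASHING ---
--     if any("iron" in i for i in issues):
--         washing["low"].append("Basic iron filter")
--         washing["medium"].append("Iron removal filter system")
--         washing["high"].append("Automatic iron removal plant")
--
--     if any("Hard water" in i for i in issues):
--         washing["medium"].append("Water softener")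
--         washing["high"].append("Full house softener system")
--
--     return {
--         "drinking": drinking,
--         "bathing": bathing,
--         "washing": washing
--     }
-- ===== SOURCE B (Python) =====
-- def get_product_recommendations(analysis):
--     issues = analysis["issues"]
--
--     needs_ro = has_iron = has_hard = has_chlorine = False
--     for i in issues:
--         if "TDS" in i or "nitrate" in i or "Acidic" in i:
--             needs_ro = True
--         if "iron" in i:
--             has_iron = True
--         if "Hard water" in i:
--             has_hard = True
--         if "chlorine" in i:
--             has_chlorine = True
--
--     bath = has_hard or has_chlorine
--     return {
--         "drinking": {
--             "low": ["Basic RO purifier"] if needs_ro else [],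
--             "medium": (["RO + UV water purifier"] if needs_ro else [])
--                       + (["RO + Iron removal filter"] if has_iron else []),
--             "high": (["RO + UV + Mineral booster purifier"] if needs_ro else [])
--                     + (["Advanced iron removal + RO system"] if has_iron else []),
--         },
--         "bathing": {
--             "low": ["Tap shower filter"] if bath else [],
--             "medium": ["Bathroom water softener"] if bath else [],
--             "high": ["Whole house water softener"] if bath else [],
--         },
--         "washing": {
--             "low": ["Basic iron filter"] if has_iron else [],
--             "medium": (["Iron removal filter system"] if has_iron else [])
--                       + (["Water softener"] if has_hard else []),
--             "high": (["Automatic iron removal plant"] if has_iron else [])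
--                     + (["Full house softener system"] if has_hard else []),
--         },
--     }
-- ===== Notes on version B (the rewrite author's own statement) =====
-- stated objective: simpler
-- what changed: One pass over issues sets four boolean flags, then the result dict is assembled directly from the flags as literals, replacing five separate any() scans and the mutate-by-append construction.
import Mathlib
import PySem

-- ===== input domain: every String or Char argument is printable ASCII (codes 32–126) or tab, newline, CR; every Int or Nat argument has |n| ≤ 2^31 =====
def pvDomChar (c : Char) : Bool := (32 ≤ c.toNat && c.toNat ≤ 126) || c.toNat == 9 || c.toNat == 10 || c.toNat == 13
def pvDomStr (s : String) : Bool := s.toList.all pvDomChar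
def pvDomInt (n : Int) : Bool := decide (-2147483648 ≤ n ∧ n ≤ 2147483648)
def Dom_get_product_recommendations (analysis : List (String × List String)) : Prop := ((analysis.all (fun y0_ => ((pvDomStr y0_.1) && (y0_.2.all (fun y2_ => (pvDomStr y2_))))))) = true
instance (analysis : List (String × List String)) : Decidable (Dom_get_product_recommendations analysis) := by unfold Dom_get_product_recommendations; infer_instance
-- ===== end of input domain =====

-- B is a simpler decomposition: one pass over issues computes four flags, then the result is assembled
-- directly from the flags, instead of A's five any() scans plus conditional appends into pre-built dicts.

-- ===== PORT A =====
-- analysis["issues"]: first-match association-list lookup (Python dict lookup)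
def pvLookupIssues (analysis : List (String × List String)) : Option (List String) :=
  (analysis.find? (fun p => p.1 == "issues")).map Prod.snd

-- d[k].append(v) on an assoc list with distinct literal keys
def pvAppendAt (d : List (String × List String)) (k : String) (v : String) : List (String × List String) :=
  d.map (fun p => if p.1 == k then (p.1, p.2 ++ [v]) else p)

def get_product_recommendations (analysis : List (String × List String)) : List (String × List (String × List String)) :=
  match pvLookupIssues analysis with
  | none => []   -- Python raises KeyError here; excluded by Pre_
  | some issues =>
    let drinking : List (String × List String) := [("low", []), ("medium", []), ("high", [])]
    let bathing : List (String × List String) := [("low", []), ("medium", []), ("high", [])]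
    let washing : List (String × List String) := [("low", []), ("medium", []), ("high", [])]
    let drinking :=
      if issues.any (fun i => PySem.Str.isIn "TDS" i || PySem.Str.isIn "nitrate" i || PySem.Str.isIn "Acidic" i) then
        pvAppendAt (pvAppendAt (pvAppendAt drinking "low" "Basic RO purifier")
          "medium" "RO + UV water purifier") "high" "RO + UV + Mineral booster purifier"
      else drinking
    let drinking :=
      if issues.any (fun i => PySem.Str.isIn "iron" i) then
        pvAppendAt (pvAppendAt drinking "medium" "RO + Iron removal filter")
          "high" "Advanced iron removal + RO system"
      else drinking
    let bathing :=
      if issues.any (fun i => PySem.Str.isIn "Hard water" i || PySem.Str.isIn "chlorine" i) then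
        pvAppendAt (pvAppendAt (pvAppendAt bathing "low" "Tap shower filter")
          "medium" "Bathroom water softener") "high" "Whole house water softener"
      else bathing
    let washing :=
      if issues.any (fun i => PySem.Str.isIn "iron" i) then
        pvAppendAt (pvAppendAt (pvAppendAt washing "low" "Basic iron filter")
          "medium" "Iron removal filter system") "high" "Automatic iron removal plant"
      else washing
    let washing :=
      if issues.any (fun i => PySem.Str.isIn "Hard water" i) then
        pvAppendAt (pvAppendAt washing "medium" "Water softener") "high" "Full house softener system"
      else washing
    [("drinking", drinking), ("bathing", bathing), ("washing", washing)]

-- ===== PORT B =====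
def get_product_recommendations_alt (analysis : List (String × List String)) : List (String × List (String × List String)) :=
  match (analysis.find? (fun p => p.1 == "issues")).map Prod.snd with
  | none => []   -- Python raises KeyError here; excluded by Pre_
  | some issues =>
    let flags := issues.foldl (fun s i =>
      (s.1 || (PySem.Str.isIn "TDS" i || PySem.Str.isIn "nitrate" i || PySem.Str.isIn "Acidic" i),
       s.2.1 || PySem.Str.isIn "iron" i,
       s.2.2.1 || PySem.Str.isIn "Hard water" i,
       s.2.2.2 || PySem.Str.isIn "chlorine" i)) (false, false, false, false)
    let needsRo := flags.1
    let hasIron := flags.2.1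
    let hasHard := flags.2.2.1
    let bath := flags.2.2.1 || flags.2.2.2
    [("drinking",
       [("low", if needsRo then ["Basic RO purifier"] else []),
        ("medium", (if needsRo then ["RO + UV water purifier"] else [])
                   ++ (if hasIron then ["RO + Iron removal filter"] else [])),
        ("high", (if needsRo then ["RO + UV + Mineral booster purifier"] else [])
                 ++ (if hasIron then ["Advanced iron removal + RO system"] else []))]),
     ("bathing",
       [("low", if bath then ["Tap shower filter"] else []),
        ("medium", if bath then ["Bathroom water softener"] else []),
        ("high", if bath then ["Whole house water softener"] else [])]),
     ("washing",
       [("low", if hasIron then ["Basic iron filter"] else []),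
        ("medium", (if hasIron then ["Iron removal filter system"] else [])
                   ++ (if hasHard then ["Water softener"] else [])),
        ("high", (if hasIron then ["Automatic iron removal plant"] else [])
                 ++ (if hasHard then ["Full house softener system"] else []))])]

-- ===== PRECONDITION & SPEC =====
-- Pre_ excludes exactly the inputs with no "issues" key, on which the Python A raises KeyError.
def Pre_get_product_recommendations (analysis : List (String × List String)) : Prop :=
  "issues" ∈ analysis.map Prod.fst
instance (analysis : List (String × List String)) : Decidable (Pre_get_product_recommendations analysis) := by unfold Pre_get_product_recommendations; infer_instance
def pvWitness_get_product_recommendations : (List (String × List String)) := [("issues", ["iron"])]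

def Spec_get_product_recommendations (analysis : List (String × List String)) (out : List (String × List (String × List String))) : Prop := out = get_product_recommendations_alt analysis
instance (analysis : List (String × List String)) (out : List (String × List (String × List String))) : Decidable (Spec_get_product_recommendations analysis out) := by unfold Spec_get_product_recommendations; infer_instance

-- ===== CLAIM (what is proved, stated in full; the proofs are below) =====
def Claim_equal_get_product_recommendations : Prop := ∀ (analysis : List (String × List String)), Dom_get_product_recommendations analysis → Pre_get_product_recommendations analysis → Spec_get_product_recommendations analysis (get_product_recommendations analysis)

-- ===== LEMMAS AND PROOFS =====

-- the single-pass flag fold computes exactly the four any() results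
lemma flags_fold (p1 p2 p3 p4 : String → Bool) (xs : List String) (s : Bool × Bool × Bool × Bool) :
    xs.foldl (fun s i => (s.1 || p1 i, s.2.1 || p2 i, s.2.2.1 || p3 i, s.2.2.2 || p4 i)) s
      = (s.1 || xs.any p1, s.2.1 || xs.any p2, s.2.2.1 || xs.any p3, s.2.2.2 || xs.any p4) := by
  induction xs generalizing s with
  | nil => simp
  | cons x xs ih =>
    obtain ⟨a, b, c, d⟩ := s
    simp [List.foldl_cons, ih, Bool.or_assoc]

-- any over a disjunction splits into two anys (A's bathing scan vs B's two flags)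
lemma any_or_split (p q : String → Bool) (xs : List String) :
    xs.any (fun i => p i || q i) = (xs.any p || xs.any q) := by
  induction xs with
  | nil => rfl
  | cons x xs ih => simp [List.any_cons, ih, Bool.or_assoc, Bool.or_left_comm]

-- ===== VERDICT (by name: the statement is the Claim_ definition above) =====
theorem get_product_recommendations_spec : Claim_equal_get_product_recommendations := by
  intro analysis _ _
  unfold Spec_get_product_recommendations get_product_recommendations get_product_recommendations_alt
  cases h : (analysis.find? (fun p => p.1 == "issues")).map Prod.snd with
  | none => simp [pvLookupIssues, h]
  | some issues =>
    simp only [pvLookupIssues, h]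
    rw [flags_fold]
    simp only [Bool.false_or]
    cases h1 : issues.any (fun i => PySem.Str.isIn "TDS" i || PySem.Str.isIn "nitrate" i || PySem.Str.isIn "Acidic" i) <;>
      cases h2 : issues.any (fun i => PySem.Str.isIn "iron" i) <;>
      cases h3 : issues.any (fun i => PySem.Str.isIn "Hard water" i) <;>
      cases h4 : issues.any (fun i => PySem.Str.isIn "chlorine" i) <;>
      simp only [any_or_split, h3, h4] <;> rfl
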